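-- pv_equiv track=rewrite | github.com/greatertomi/Codility-Practices | Solutions/Euclidean Algorithm/ChocolatesByNumber.py | solution
-- ===== SOURCE A (Python) =====
-- def solution(chocolates, num):
--     eaten = []
--     toEat = 0
--     eaten.append(toEat)
--     while True:
--         toEat = (toEat + num) % chocolates
--         if toEat not in eaten:
--             eaten.append(toEat)
--         else:
--             break
--
--     return len(eaten)
-- ===== SOURCE B (Python) =====
-- def solution(chocolates, num):
--     # closed form: the cycle 0, num, 2*num, ... (mod chocolates) first repeats
--     # after |chocolates| // gcd(chocolates, num) steps (Euclid's algorithm).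
--     a, b = abs(chocolates), abs(num)
--     while b:
--         a, b = b, a % b
--     return abs(chocolates) // a
-- ===== Notes on version B (the rewrite author's own statement) =====
-- stated objective: faster
-- what changed: Replaces the simulation of the eating cycle (a loop with a linear membership scan of the visited list) by the closed form |chocolates| // gcd(chocolates, num), with gcd computed by Euclid's algorithm.
-- crash fix: On chocolates = 0 with num != 0, A raises ZeroDivisionError; B returns 0 (no chocolates, none eaten). — e.g. on solution(0, 3): A raises ZeroDivisionError, B returns 0
import Mathlib
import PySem

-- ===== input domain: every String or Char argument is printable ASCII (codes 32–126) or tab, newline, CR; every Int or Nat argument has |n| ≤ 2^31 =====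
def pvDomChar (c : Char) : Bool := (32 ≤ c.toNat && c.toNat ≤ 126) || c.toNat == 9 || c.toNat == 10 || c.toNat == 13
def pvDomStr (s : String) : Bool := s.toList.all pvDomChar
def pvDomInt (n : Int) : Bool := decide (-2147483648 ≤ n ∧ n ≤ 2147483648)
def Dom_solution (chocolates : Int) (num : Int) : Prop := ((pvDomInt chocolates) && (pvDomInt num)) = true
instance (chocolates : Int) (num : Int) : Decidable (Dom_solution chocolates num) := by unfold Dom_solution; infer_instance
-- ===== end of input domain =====

-- B replaces A's cycle simulation (loop + linear membership scan) by the closed form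
-- |chocolates| // gcd(chocolates, num) with a hand-written Euclid loop (asymptotically faster).


-- ===== PORT A =====
-- the `while True` loop; the fuel argument only makes it total (|chocolates| + 1
-- iterations always suffice, proved below), it never changes the computed value
def solutionLoop (chocolates num : Int) : Nat → List Int → Int → Int
  | 0, eaten, _ => (eaten.length : Int)
  | fuel + 1, eaten, toEat =>
    let t := PySem.Int.mod (toEat + num) chocolates
    if t ∈ eaten then (eaten.length : Int)
    else solutionLoop chocolates num fuel (eaten ++ [t]) t

def solution (chocolates : Int) (num : Int) : Int :=
  solutionLoop chocolates num (chocolates.natAbs + 1) [0] 0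

-- ===== PORT B =====
-- B's hand-written Euclid loop `while b: a, b = b, a % b`
def euclidGo : Nat → Nat → Nat → Nat
  | 0, a, _ => a
  | fuel + 1, a, b => if b = 0 then a else euclidGo fuel b (a % b)

-- fuel `b` always suffices: the second operand strictly decreases each iteration
def euclid (a b : Nat) : Nat := euclidGo b a b

def solution_alt (chocolates : Int) (num : Int) : Int :=
  (chocolates.natAbs / euclid chocolates.natAbs num.natAbs : Nat)

-- ===== PRECONDITION & SPEC =====
-- A raises ZeroDivisionError iff chocolates = 0 (the `% chocolates`)
def Pre_solution (chocolates : Int) (num : Int) : Prop := chocolates ≠ 0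
instance (chocolates : Int) (num : Int) : Decidable (Pre_solution chocolates num) := by
  unfold Pre_solution; infer_instance

def pvWitness_solution : Int × Int := (10, 4)

-- On chocolates = 0 with num ≠ 0, A raises ZeroDivisionError; B returns 0 (no chocolates, none eaten).
def Raises_solution (chocolates : Int) (num : Int) : Prop := chocolates = 0 ∧ num ≠ 0
instance (chocolates : Int) (num : Int) : Decidable (Raises_solution chocolates num) := by
  unfold Raises_solution; infer_instance
def pvRaiseWitness_solution : Int × Int := (0, 3)
def pvRaiseWitnessOut_solution : Int := 0

def Spec_solution (chocolates : Int) (num : Int) (out : Int) : Prop := out = solution_alt chocolates num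
instance (chocolates : Int) (num : Int) (out : Int) : Decidable (Spec_solution chocolates num out) := by
  unfold Spec_solution; infer_instance

-- ===== CLAIM (what is proved, stated in full; the proofs are below) =====
def Claim_equal_solution : Prop := ∀ (chocolates : Int) (num : Int), Dom_solution chocolates num → Pre_solution chocolates num → Spec_solution chocolates num (solution chocolates num)
def Claim_raises_solution : Prop := (∀ (chocolates : Int) (num : Int), Dom_solution chocolates num → Raises_solution chocolates num → ¬ Pre_solution chocolates num) ∧ (Dom_solution (pvRaiseWitness_solution.1) (pvRaiseWitness_solution.2) ∧ Raises_solution (pvRaiseWitness_solution.1) (pvRaiseWitness_solution.2) ∧ solution_alt (pvRaiseWitness_solution.1) (pvRaiseWitness_solution.2) = pvRaiseWitnessOut_solution)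

-- ===== LEMMAS AND PROOFS =====

theorem euclidGo_eq_gcd (fuel a b : Nat) (hb : b ≤ fuel) : euclidGo fuel a b = Nat.gcd a b := by
  induction fuel generalizing a b with
  | zero =>
    have : b = 0 := by omega
    simp [euclidGo, this]
  | succ fuel ih =>
    rw [euclidGo]
    by_cases hb0 : b = 0
    · simp [hb0]
    · rw [if_neg hb0, ih b (a % b) (by have := Nat.mod_lt a (Nat.pos_of_ne_zero hb0); omega),
        Nat.gcd_comm b (a % b), ← Nat.gcd_rec, Nat.gcd_comm]

theorem euclid_eq_gcd (a b : Nat) : euclid a b = Nat.gcd a b :=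
  euclidGo_eq_gcd b a b le_rfl

-- the k-th position eaten
def pf (c num : Int) (k : Nat) : Int := PySem.Int.mod ((k : Int) * num) c

theorem pmod_eq_fmod (a b : Int) : PySem.Int.mod a b = Int.fmod a b := rfl

theorem fmod_eq_iff (c : Int) (x y : Int) :
    Int.fmod x c = Int.fmod y c ↔ c ∣ (x - y) := by
  constructor
  · intro h
    exact ⟨x.fdiv c - y.fdiv c, by
      have hx := Int.fmod_def x c
      have hy := Int.fmod_def y c
      linear_combination h + hy - hx⟩
  · rintro ⟨t, ht⟩
    have : x = y + c * t := by omega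
    rw [this, Int.add_mul_fmod_self_left]

theorem nat_dvd_iff (m nn d : Nat) (hm : m ≠ 0) :
    m ∣ d * nn ↔ (m / Nat.gcd m nn) ∣ d := by
  set g := Nat.gcd m nn with hg
  have hg0 : 0 < g := Nat.gcd_pos_of_pos_left nn (Nat.pos_of_ne_zero hm)
  have hm' : g * (m / g) = m := Nat.mul_div_cancel' (Nat.gcd_dvd_left m nn)
  have hn' : g * (nn / g) = nn := Nat.mul_div_cancel' (Nat.gcd_dvd_right m nn)
  have hco : Nat.Coprime (m / g) (nn / g) := Nat.coprime_div_gcd_div_gcd hg0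
  have h3 : d * nn = g * (d * (nn / g)) := by
    conv_lhs => rw [← hn']
    ring
  constructor
  · intro h
    have h2 : g * (m / g) ∣ g * (d * (nn / g)) := by rw [hm', ← h3]; exact h
    exact hco.dvd_of_dvd_mul_right ((Nat.mul_dvd_mul_iff_left hg0).1 h2)
  · intro h
    have h2 : g * (m / g) ∣ g * (d * (nn / g)) :=
      Nat.mul_dvd_mul_left g (h.mul_right _)
    rw [hm', ← h3] at h2
    exact h2

theorem pf_eq_iff (c num : Int) (hc : c ≠ 0) (i j : Nat) (hij : i ≤ j) :
    pf c num j = pf c num i ↔ (c.natAbs / Nat.gcd c.natAbs num.natAbs) ∣ (j - i) := by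
  rw [pf, pf, pmod_eq_fmod, pmod_eq_fmod, fmod_eq_iff c]
  have h1 : (j : Int) * num - (i : Int) * num = ((j - i : Nat) : Int) * num := by
    push_cast [hij]; ring
  rw [h1, ← Int.natAbs_dvd_natAbs, Int.natAbs_mul, Int.natAbs_natCast]
  exact nat_dvd_iff _ _ _ (by simpa using hc)

theorem pf_zero (c num : Int) : pf c num 0 = 0 := by
  simp [pf, pmod_eq_fmod, Int.zero_fmod]

theorem pf_succ (c num : Int) (k : Nat) :
    pf c num (k + 1) = PySem.Int.mod (pf c num k + num) c := by
  rw [pf, pf, pmod_eq_fmod, pmod_eq_fmod, pmod_eq_fmod, Int.fmod_add_fmod]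
  congr 1
  push_cast; ring

theorem pf_period (c num : Int) (hc : c ≠ 0) :
    pf c num (c.natAbs / Nat.gcd c.natAbs num.natAbs) = 0 := by
  have h0 := pf_zero c num
  have := (pf_eq_iff c num hc 0 (c.natAbs / Nat.gcd c.natAbs num.natAbs) (Nat.zero_le _)).2
    (by simpa using dvd_refl _)
  omega

theorem period_pos (c num : Int) (hc : c ≠ 0) :
    0 < c.natAbs / Nat.gcd c.natAbs num.natAbs := by
  have hm : 0 < c.natAbs := by simpa using Int.natAbs_pos.2 hc
  have hd : Nat.gcd c.natAbs num.natAbs ∣ c.natAbs := Nat.gcd_dvd_left _ _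
  exact Nat.div_pos (Nat.le_of_dvd hm hd) (Nat.gcd_pos_of_pos_left _ hm)

theorem loop_inv (c num : Int) (hc : c ≠ 0) (fuel k : Nat) (hk1 : 1 ≤ k)
    (hkp : k ≤ c.natAbs / Nat.gcd c.natAbs num.natAbs)
    (hfuel : c.natAbs / Nat.gcd c.natAbs num.natAbs - k < fuel) :
    solutionLoop c num fuel ((List.range k).map (pf c num)) (pf c num (k - 1)) =
      ((c.natAbs / Nat.gcd c.natAbs num.natAbs : Nat) : Int) := by
  set p := c.natAbs / Nat.gcd c.natAbs num.natAbs with hp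
  induction fuel generalizing k with
  | zero => omega
  | succ fuel ih =>
    rw [solutionLoop]
    have hstep : PySem.Int.mod (pf c num (k - 1) + num) c = pf c num k := by
      have := pf_succ c num (k - 1)
      rw [← this]
      congr 1
      omega
    rw [hstep]
    by_cases hkeq : k = p
    · have hmem : pf c num k ∈ (List.range k).map (pf c num) := by
        have : pf c num k = pf c num 0 := by
          rw [hkeq, pf_period c num hc, pf_zero]
        rw [this]
        exact List.mem_map_of_mem (List.mem_range.2 (by omega))
      simp only [hmem, if_true]
      simp [hkeq]
    · have hklt : k < p := by omega
      have hnmem : pf c num k ∉ (List.range k).map (pf c num) := by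
        intro hmem
        obtain ⟨i, hi, hfi⟩ := List.mem_map.1 hmem
        rw [List.mem_range] at hi
        have := (pf_eq_iff c num hc i k (by omega)).1 (by rw [hfi])
        have := Nat.le_of_dvd (by omega) this
        omega
      simp only [hnmem, if_false]
      have hext : (List.range k).map (pf c num) ++ [pf c num k] =
          (List.range (k + 1)).map (pf c num) := by
        rw [List.range_succ, List.map_append]; rfl
      rw [hext]
      have := ih (k + 1) (by omega) (by omega) (by omega)
      simp only [Nat.add_sub_cancel] at this
      exact this

-- ===== VERDICT (by name: the statement is the Claim_ definition above) =====
theorem solution_spec : Claim_equal_solution := by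
  intro c num _ hpre
  unfold Spec_solution solution solution_alt
  rw [euclid_eq_gcd]
  have hc : c ≠ 0 := hpre
  have h1 : ([0] : List Int) = (List.range 1).map (pf c num) := by
    simp [pf_zero]
  have h0 : (0 : Int) = pf c num (1 - 1) := (pf_zero c num).symm
  rw [h1, h0]
  apply loop_inv c num hc
  · omega
  · exact period_pos c num hc
  · have : c.natAbs / Nat.gcd c.natAbs num.natAbs ≤ c.natAbs := Nat.div_le_self _ _
    omega

@[simp] theorem solution_raises : Claim_raises_solution := by
  unfold Claim_raises_solution
  refine ⟨?_, by decide⟩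
  intro c num _ hr hpre
  exact hpre hr.1
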